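-- pv_equiv track=rewrite | github.com/liormedan/AudioChat-electron | tests/performance/performance_config.py | generate_long_message
-- ===== SOURCE A (Python) =====
-- def generate_long_message(word_count: int = 100) -> str:
--     """Generate a long test message"""
--     words = [
--         "performance", "testing", "message", "content", "system",
--         "response", "evaluation", "benchmark", "load", "stress",
--         "concurrent", "users", "requests", "throughput", "latency"
--     ]
--
--     message_words = []
--     for i in range(word_count):
--         message_words.append(words[i % len(words)])
--
--     return " ".join(message_words)
-- ===== SOURCE B (Python) =====
-- def generate_long_message(word_count: int = 100) -> str:
--     """Generate a long test message"""
--     words = [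
--         "performance", "testing", "message", "content", "system",
--         "response", "evaluation", "benchmark", "load", "stress",
--         "concurrent", "users", "requests", "throughput", "latency"
--     ]
--     n = max(word_count, 0)
--     q, r = divmod(n, len(words))
--     return " ".join(words * q + words[:r])
-- ===== Notes on version B (the rewrite author's own statement) =====
-- stated objective: simpler
-- what changed: Replaced the per-index loop with per-element modulo by a single divmod: the message is the word list replicated q times plus a slice of the first r words, with negative counts clamped to 0.
import Mathlib
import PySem

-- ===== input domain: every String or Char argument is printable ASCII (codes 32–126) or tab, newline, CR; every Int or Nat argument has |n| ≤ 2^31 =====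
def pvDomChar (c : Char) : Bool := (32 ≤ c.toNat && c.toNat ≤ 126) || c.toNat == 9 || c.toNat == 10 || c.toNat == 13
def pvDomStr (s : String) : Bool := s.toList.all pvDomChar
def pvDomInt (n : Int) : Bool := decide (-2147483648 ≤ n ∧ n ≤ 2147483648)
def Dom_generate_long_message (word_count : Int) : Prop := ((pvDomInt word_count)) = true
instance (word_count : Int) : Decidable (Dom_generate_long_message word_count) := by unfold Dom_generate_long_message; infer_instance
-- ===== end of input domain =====

-- B replaces the per-index loop with modulo lookup by a single divmod: full replications of the word list plus a prefix slice (negative counts clamped to 0); objective: simpler.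


-- the word list literal shared by both Pythons
def pvWords : List String :=
  ["performance", "testing", "message", "content", "system",
   "response", "evaluation", "benchmark", "load", "stress",
   "concurrent", "users", "requests", "throughput", "latency"]

-- ===== PORT A =====
-- for i in range(word_count): message_words.append(words[i % len(words)])
-- (index i % 15 is always in range, so .getD "" is exact)
def generate_long_message (word_count : Int) : String :=
  let message_words :=
    (PySem.List.pyRange 0 word_count 1).foldl
      (fun acc i => acc ++ [(PySem.List.pyGet? pvWords (PySem.Int.mod i 15)).getD ""]) []
  PySem.Str.join " " message_words

-- ===== PORT B =====
-- n = max(word_count, 0); q, r = divmod(n, 15); " ".join(words * q + words[:r])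
def generate_long_message_alt (word_count : Int) : String :=
  let n := max word_count 0
  let q := PySem.Int.floordiv n 15
  let r := PySem.Int.mod n 15
  PySem.Str.join " " (PySem.List.pyRepeat pvWords q ++ PySem.List.slice pvWords none (some r))

-- ===== PRECONDITION & SPEC =====
def Spec_generate_long_message (word_count : Int) (out : String) : Prop := out = generate_long_message_alt word_count
instance (word_count : Int) (out : String) : Decidable (Spec_generate_long_message word_count out) := by unfold Spec_generate_long_message; infer_instance

-- ===== CLAIM (what is proved, stated in full; the proofs are below) =====
def Claim_equal_generate_long_message : Prop := ∀ (word_count : Int), Dom_generate_long_message word_count → Spec_generate_long_message word_count (generate_long_message word_count)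

-- ===== LEMMAS AND PROOFS =====

-- A's accumulated list over range(0, k) equals q full copies of the word list plus the first r words
theorem pv_loop_eq (k : Nat) :
    (PySem.List.pyRange 0 (k : Int) 1).foldl
      (fun acc i => acc ++ [(PySem.List.pyGet? pvWords (PySem.Int.mod i 15)).getD ""]) []
    = (List.replicate (k / 15) pvWords).flatten ++ pvWords.take (k % 15) := by
  induction k with
  | zero => simp [PySem.List.pyRange_one_eq_nil]
  | succ k ih =>
    have hcast : ((k + 1 : Nat) : Int) = (k : Int) + 1 := by push_cast; ring
    rw [hcast, PySem.List.pyRange_one_succ_right (by positivity), List.foldl_append, ih]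
    have hmod : PySem.Int.mod (k : Int) 15 = ((k % 15 : Nat) : Int) := by
      exact_mod_cast PySem.Int.mod_natCast k 15
    simp only [List.foldl_cons, List.foldl_nil, hmod]
    have hget : (PySem.List.pyGet? pvWords ((k % 15 : Nat) : Int)).getD ""
        = pvWords.getD (k % 15) "" := by
      have h15 : k % 15 < 15 := Nat.mod_lt _ (by norm_num)
      interval_cases h : (k % 15) <;> simp [pvWords, PySem.List.pyGet?, PySem.List.pyIdx?]
    rw [hget]
    by_cases h14 : k % 15 = 14
    · have hq : (k + 1) / 15 = k / 15 + 1 := by omega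
      have hr : (k + 1) % 15 = 0 := by omega
      rw [hq, hr, h14, List.replicate_succ' , List.flatten_append]
      simp [pvWords, List.take_add_one]
    · have hq : (k + 1) / 15 = k / 15 := by omega
      have hr : (k + 1) % 15 = k % 15 + 1 := by omega
      have hlt : k % 15 < pvWords.length := by
        have : k % 15 < 15 := Nat.mod_lt _ (by norm_num)
        simpa [pvWords] using this
      rw [hq, hr, List.append_assoc]
      congr 1
      rw [List.take_add_one]
      simp [List.getElem?_eq_getElem hlt, List.getD]

-- ===== VERDICT (by name: the statement is the Claim_ definition above) =====
theorem generate_long_message_spec : Claim_equal_generate_long_message := by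
  intro word_count _
  unfold Spec_generate_long_message generate_long_message generate_long_message_alt
  by_cases hle : word_count ≤ 0
  · rw [PySem.List.pyRange_one_eq_nil hle]
    have hmax : max word_count 0 = 0 := by omega
    simp [hmax, PySem.Int.floordiv, PySem.Int.mod, PySem.List.pyRepeat, PySem.List.slice]
  · obtain ⟨k, hk⟩ : ∃ k : Nat, word_count = (k : Int) :=
      ⟨word_count.toNat, (Int.toNat_of_nonneg (by omega)).symm⟩
    subst hk
    have hmax : max (k : Int) 0 = (k : Int) := by omega
    rw [pv_loop_eq, hmax]
    simp only [show (15 : Int) = ((15 : Nat) : Int) by norm_num, PySem.Int.floordiv_natCast,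
      PySem.Int.mod_natCast, PySem.List.slice_to_natCast, PySem.List.pyRepeat]
    simp
    rw [show ((k : Int) / 15).toNat = k / 15 by omega]
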